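-- pv_equiv track=rewrite | github.com/tranviethung1/convert_lua | convert.py | format_lua_table
-- ===== SOURCE A (Python) =====
-- def format_lua_table(lua_str: str) -> str:
--     indent = 0
--     result = ""
--     i = 0
--     in_string = False
--     string_char = ''
--
--     while i < len(lua_str):
--         c = lua_str[i]
--
--         if c in ["'", '"']:
--             if not in_string:
--                 in_string = True
--                 string_char = c
--             elif in_string and c == string_char and lua_str[i - 1] != '\\':
--                 in_string = False
--             result += c
--             i += 1
--             continue
--
--         if in_string:
--             result += c
--             i += 1
--             continue
--
--         if lua_str[i:i+8] == "__size =":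
--             while i < len(lua_str) and lua_str[i] not in [',', '}']:
--                 i += 1
--             if i < len(lua_str) and lua_str[i] == ',':
--                 i += 1
--             continue
--
--         if c == '{':
--             result += "{\n"
--             indent += 1
--             result += "    " * indent
--         elif c == '}':
--             result += "\n"
--             indent -= 1
--             result += "    " * indent + "}"
--         elif c == ',':
--             result += ",\n" + "    " * indent
--         elif c == '\n':
--             result += "\n" + "    " * indent
--         else:
--             result += c
--
--         i += 1
--
--     return result
-- ===== SOURCE B (Python) =====
-- # Two-phase re-implementation: phase 1 tokenizes (string-literal tracking and
-- # __size-skip done here), phase 2 renders with the indent counter; join at end.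
--
-- def _tokenize(s):
--     toks = []
--     i = 0
--     n = len(s)
--     in_string = False
--     string_char = ''
--     while i < n:
--         c = s[i]
--         if c in ("'", '"'):
--             if not in_string:
--                 in_string = True
--                 string_char = c
--             elif c == string_char and s[i - 1] != '\\':
--                 in_string = False
--             toks.append(('lit', c))
--             i += 1
--         elif in_string:
--             toks.append(('lit', c))
--             i += 1
--         elif s[i:i + 8] == "__size =":
--             while i < n and s[i] not in (',', '}'):
--                 i += 1
--             if i < n and s[i] == ',':
--                 i += 1
--         elif c == '{':
--             toks.append(('open', c))
--             i += 1
--         elif c == '}':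
--             toks.append(('close', c))
--             i += 1
--         elif c == ',':
--             toks.append(('comma', c))
--             i += 1
--         elif c == '\n':
--             toks.append(('nl', c))
--             i += 1
--         else:
--             toks.append(('lit', c))
--             i += 1
--     return toks
--
--
-- def _render(toks):
--     out = []
--     indent = 0
--     for kind, c in toks:
--         if kind == 'open':
--             indent += 1
--             out.append('{\n' + '    ' * indent)
--         elif kind == 'close':
--             indent -= 1
--             out.append('\n' + '    ' * indent + '}')
--         elif kind == 'comma':
--             out.append(',\n' + '    ' * indent)
--         elif kind == 'nl':
--             out.append('\n' + '    ' * indent)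
--         else:
--             out.append(c)
--     return ''.join(out)
--
--
-- def format_lua_table(lua_str: str) -> str:
--     return _render(_tokenize(lua_str))
-- ===== Notes on version B (the rewrite author's own statement) =====
-- stated objective: faster
-- what changed: Replaces A's single interleaved while-loop that grows a string by repeated concatenation with a two-phase pipeline: a tokenizer that handles string-literal tracking and the size-field skip and emits a token list, then a separate renderer that carries the indent counter, collects pieces in a list and joins once at the end.
import Mathlib
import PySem

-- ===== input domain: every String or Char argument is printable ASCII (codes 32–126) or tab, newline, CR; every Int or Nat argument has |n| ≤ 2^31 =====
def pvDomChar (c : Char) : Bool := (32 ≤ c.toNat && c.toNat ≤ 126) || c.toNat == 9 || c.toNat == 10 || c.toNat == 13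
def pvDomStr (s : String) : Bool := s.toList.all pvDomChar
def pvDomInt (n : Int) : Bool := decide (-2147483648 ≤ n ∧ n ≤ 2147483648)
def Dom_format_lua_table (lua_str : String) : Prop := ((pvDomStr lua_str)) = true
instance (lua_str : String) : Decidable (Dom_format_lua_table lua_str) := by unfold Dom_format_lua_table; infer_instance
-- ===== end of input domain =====

-- B re-implements A as two passes (tokenizer, then indent-aware renderer collecting pieces and joining once); same output, measured faster (avoids repeated string concatenation).

-- "    " * indent  (Python string repetition; empty for indent ≤ 0)
def pySpaces (indent : Int) : String := String.join (List.replicate indent.toNat "    ")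

-- ===== PORT A =====

-- the inner `while i < len(s) and s[i] not in [',', '}']` skip of A
def sizeSkipA (cs : List Char) (i : Nat) : Nat :=
  if i < cs.length ∧ ¬(cs.getD i ' ' = ',' ∨ cs.getD i ' ' = '}') then sizeSkipA cs (i + 1) else i
termination_by cs.length - i
decreasing_by omega

-- A's single while loop, one fuel unit per iteration (i strictly increases each
-- iteration, so fuel = cs.length is exact); `s[i-1]` at i = 0 is Python's wrap to
-- the last char, ported via pyGet? on (i : Int) - 1 (the getD default is never hit
-- since i < length, hence -1 ≥ -length is in range).
def loopA (cs : List Char) : Nat → Nat → Int → Bool → Char → String → String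
  | 0, _, _, _, _, res => res
  | fuel + 1, i, indent, inS, sc, res =>
    if i < cs.length then
      let c := cs.getD i ' '
      if c = '\'' ∨ c = '"' then
        if ¬ inS then loopA cs fuel (i + 1) indent true c (res ++ String.singleton c)
        else if c = sc ∧ (PySem.List.pyGet? cs ((i : Int) - 1)).getD ' ' ≠ '\\' then
          loopA cs fuel (i + 1) indent false sc (res ++ String.singleton c)
        else loopA cs fuel (i + 1) indent inS sc (res ++ String.singleton c)
      else if inS then loopA cs fuel (i + 1) indent inS sc (res ++ String.singleton c)
      else if List.take 8 (List.drop i cs) = "__size =".toList then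
        let j := sizeSkipA cs i
        let j' := if j < cs.length ∧ cs.getD j ' ' = ',' then j + 1 else j
        loopA cs fuel j' indent inS sc res
      else if c = '{' then loopA cs fuel (i + 1) (indent + 1) inS sc (res ++ "{\n" ++ pySpaces (indent + 1))
      else if c = '}' then loopA cs fuel (i + 1) (indent - 1) inS sc (res ++ "\n" ++ pySpaces (indent - 1) ++ "}")
      else if c = ',' then loopA cs fuel (i + 1) indent inS sc (res ++ ",\n" ++ pySpaces indent)
      else if c = '\n' then loopA cs fuel (i + 1) indent inS sc (res ++ "\n" ++ pySpaces indent)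
      else loopA cs fuel (i + 1) indent inS sc (res ++ String.singleton c)
    else res

def format_lua_table (lua_str : String) : String :=
  loopA lua_str.toList lua_str.length 0 0 false ' ' ""

-- ===== PORT B =====

inductive Tok : Type
  | lit : Char → Tok
  | lbrace : Tok
  | rbrace : Tok
  | comma : Tok
  | nl : Tok
deriving DecidableEq, Repr

-- the inner skip of B's tokenizer (same while loop as in Source B)
def sizeSkipB (cs : List Char) (i : Nat) : Nat :=
  if i < cs.length ∧ ¬(cs.getD i ' ' = ',' ∨ cs.getD i ' ' = '}') then sizeSkipB cs (i + 1) else i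
termination_by cs.length - i
decreasing_by omega

-- phase 1: tokenizer (Source B's _tokenize; toks.append becomes cons of the emitted token)
def tokB (cs : List Char) : Nat → Nat → Bool → Char → List Tok
  | 0, _, _, _ => []
  | fuel + 1, i, inS, sc =>
    if i < cs.length then
      let c := cs.getD i ' '
      if c = '\'' ∨ c = '"' then
        if ¬ inS then Tok.lit c :: tokB cs fuel (i + 1) true c
        else if c = sc ∧ (PySem.List.pyGet? cs ((i : Int) - 1)).getD ' ' ≠ '\\' then
          Tok.lit c :: tokB cs fuel (i + 1) false sc
        else Tok.lit c :: tokB cs fuel (i + 1) inS sc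
      else if inS then Tok.lit c :: tokB cs fuel (i + 1) inS sc
      else if List.take 8 (List.drop i cs) = "__size =".toList then
        let j := sizeSkipB cs i
        let j' := if j < cs.length ∧ cs.getD j ' ' = ',' then j + 1 else j
        tokB cs fuel j' inS sc
      else if c = '{' then Tok.lbrace :: tokB cs fuel (i + 1) inS sc
      else if c = '}' then Tok.rbrace :: tokB cs fuel (i + 1) inS sc
      else if c = ',' then Tok.comma :: tokB cs fuel (i + 1) inS sc
      else if c = '\n' then Tok.nl :: tokB cs fuel (i + 1) inS sc
      else Tok.lit c :: tokB cs fuel (i + 1) inS sc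
    else []

-- phase 2: renderer (Source B's _render; out.append becomes out ++ [piece], joined at the end)
def renderB : List Tok → Int → List String → List String
  | [], _, out => out
  | t :: ts, indent, out =>
    match t with
    | .lbrace => renderB ts (indent + 1) (out ++ ["{\n" ++ pySpaces (indent + 1)])
    | .rbrace => renderB ts (indent - 1) (out ++ ["\n" ++ pySpaces (indent - 1) ++ "}"])
    | .comma => renderB ts indent (out ++ [",\n" ++ pySpaces indent])
    | .nl => renderB ts indent (out ++ ["\n" ++ pySpaces indent])
    | .lit c => renderB ts indent (out ++ [String.singleton c])

def format_lua_table_alt (lua_str : String) : String :=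
  String.join (renderB (tokB lua_str.toList lua_str.length 0 false ' ') 0 [])

-- ===== PRECONDITION & SPEC =====
def Spec_format_lua_table (lua_str : String) (out : String) : Prop := out = format_lua_table_alt lua_str
instance (lua_str : String) (out : String) : Decidable (Spec_format_lua_table lua_str out) := by unfold Spec_format_lua_table; infer_instance

-- ===== CLAIM (what is proved, stated in full; the proofs are below) =====
def Claim_equal_format_lua_table : Prop := ∀ (lua_str : String), Dom_format_lua_table lua_str → Spec_format_lua_table lua_str (format_lua_table lua_str)

-- ===== LEMMAS AND PROOFS =====

theorem sizeSkip_eq (cs : List Char) (i : Nat) : sizeSkipA cs i = sizeSkipB cs i := by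
  rw [sizeSkipA, sizeSkipB]
  split
  · exact sizeSkip_eq cs (i + 1)
  · rfl
termination_by cs.length - i
decreasing_by omega

theorem renderB_acc (ts : List Tok) (indent : Int) (out : List String) :
    renderB ts indent out = out ++ renderB ts indent [] := by
  induction ts generalizing indent out with
  | nil => simp [renderB]
  | cons t ts ih =>
    cases t <;> simp only [renderB, List.nil_append] <;>
      rw [ih, ih _ [_]] <;> simp

theorem join_acc (l : List String) (a : String) :
    List.foldl (· ++ ·) a l = a ++ List.foldl (· ++ ·) "" l := by
  induction l generalizing a with
  | nil => simp
  | cons x l ih =>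
    simp only [List.foldl]
    rw [ih (a ++ x), ih ("" ++ x)]
    simp [String.append_assoc]

theorem join_cons (a : String) (l : List String) :
    String.join (a :: l) = a ++ String.join l := by
  simp only [String.join, List.foldl]
  rw [join_acc]
  simp

theorem loopA_eq_render (cs : List Char) (fuel i : Nat) (indent : Int) (inS : Bool)
    (sc : Char) (res : String) :
    loopA cs fuel i indent inS sc res =
      res ++ String.join (renderB (tokB cs fuel i inS sc) indent []) := by
  induction fuel generalizing i indent inS sc res with
  | zero => simp [loopA, tokB, renderB, String.join]
  | succ fuel ih =>
    rw [loopA, tokB]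
    by_cases h1 : i < cs.length
    · simp only [if_pos h1]
      simp only [sizeSkip_eq]
      split_ifs with h2 h3 h4 h5 h6 h7 h8 h9 h10 <;> rw [ih] <;>
        simp only [renderB, List.nil_append] <;>
        rw [renderB_acc _ _ [_], List.singleton_append, join_cons] <;>
        simp only [String.append_assoc]
    · simp [if_neg h1, renderB, String.join]

-- ===== VERDICT (by name: the statement is the Claim_ definition above) =====
theorem format_lua_table_spec : Claim_equal_format_lua_table := by
  intro s _
  unfold Spec_format_lua_table format_lua_table format_lua_table_alt
  rw [loopA_eq_render]
  simp
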